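-- pv_equiv track=rewrite | github.com/originalnicodr/LCC-CarpetaDigital | Segundo año/Complementos de Matemática I/practica3.py | check_is_eulerian_trail
-- ===== SOURCE A (Python) =====
-- def check_is_eulerian_trail(graph, path):
--     """Comprueba si una lista de aristas constituye un camino euleriano
--     en un grafo.
--
--     Args:
--         graph (grafo): Grafo en formato de listas.
--                        Ej: (['a', 'b', 'c'], [('a', 'b'), ('b', 'c')])
--
--         path (lista de aristas): posible camino
--                                  Ej: [('a', 'b), ('b', 'c')]
--
--     Returns:
--         boolean: path es camino euleriano en graph
--
--     Raises:
--         TypeError: Cuando el tipo de un argumento es inválido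
--     """
--     vertices,edges=graph#parseo
--     lastVertix= None
--     visitedVertices= set()
--     visitedEdges= set()
--
--     for edge in path:
--         if edge not in edges or edge in visitedEdges:   return False
--         if lastVertix!=None and lastVertix!=edge[0]: return False
--         if lastVertix==None: visitedVertices.add(edge[0])
--         if edge[1] in visitedVertices: return False
--         lastVertix=edge[1]
--         visitedVertices.add(edge[1])
--         visitedEdges.add(edge)
--     return visitedVertices==set(vertices)
-- ===== SOURCE B (Python) =====
-- def check_is_eulerian_trail(graph, path):
--     vertices, edges = graph
--     if not path:
--         return set(vertices) == set()
--     chain = [path[0][0]] + [e[1] for e in path]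
--     return (all(e in edges for e in path)
--             and all(a[1] == b[0] for a, b in zip(path, path[1:]))
--             and len(set(chain)) == len(chain)
--             and set(chain) == set(vertices))
-- ===== Notes on version B (the rewrite author's own statement) =====
-- stated objective: simpler
-- what changed: A's single stateful scan (lastVertix/visitedVertices/visitedEdges accumulators with early returns) is replaced by an explicit empty-path case plus building the vertex chain once and four independent whole-path passes: edge membership, zip-based continuity, chain distinctness via len(set), and set comparison; the duplicate-edge set disappears because distinct chain vertices plus continuity already imply distinct edges.
import Mathlib
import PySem

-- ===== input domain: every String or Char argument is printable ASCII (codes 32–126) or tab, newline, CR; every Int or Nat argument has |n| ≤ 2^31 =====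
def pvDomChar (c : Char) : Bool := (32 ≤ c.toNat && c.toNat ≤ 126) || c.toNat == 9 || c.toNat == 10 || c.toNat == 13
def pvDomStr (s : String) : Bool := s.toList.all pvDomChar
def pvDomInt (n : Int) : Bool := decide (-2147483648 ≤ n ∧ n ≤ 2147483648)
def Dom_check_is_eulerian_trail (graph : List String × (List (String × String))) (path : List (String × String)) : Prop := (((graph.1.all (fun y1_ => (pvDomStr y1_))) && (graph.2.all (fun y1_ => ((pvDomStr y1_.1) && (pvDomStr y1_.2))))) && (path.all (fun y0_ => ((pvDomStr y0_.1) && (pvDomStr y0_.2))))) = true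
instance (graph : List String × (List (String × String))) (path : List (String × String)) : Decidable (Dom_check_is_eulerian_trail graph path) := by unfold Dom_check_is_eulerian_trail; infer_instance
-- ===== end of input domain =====

-- B re-decomposes A's single stateful scan into separate whole-path passes
-- (membership, continuity via zip, chain distinctness, set comparison); objective: simpler.


-- ===== PORT A =====
-- A's for-loop over path, carrying lastVertix / visitedVertices / visitedEdges;
-- the nil case is A's final 'return visitedVertices == set(vertices)'.
def aLoop (vertices : List String) (edges : List (String × String)) :
    List (String × String) → Option String → PySem.Set String → PySem.Set (String × String) → Bool
  | [], _, visV, _ => PySem.Set.equal visV (PySem.Set.ofList vertices)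
  | edge :: rest, lastV, visV, visE =>
    if !edges.contains edge || PySem.Set.contains visE edge then false
    else if (match lastV with | some v => v != edge.1 | none => false) then false
    else
      let visV' := match lastV with | none => PySem.Set.add visV edge.1 | some _ => visV
      if PySem.Set.contains visV' edge.2 then false
      else aLoop vertices edges rest (some edge.2) (PySem.Set.add visV' edge.2) (PySem.Set.add visE edge)

def check_is_eulerian_trail (graph : List String × (List (String × String))) (path : List (String × String)) : Bool :=
  aLoop graph.1 graph.2 path none PySem.Set.empty PySem.Set.empty

-- ===== PORT B =====
def check_is_eulerian_trail_alt (graph : List String × (List (String × String))) (path : List (String × String)) : Bool :=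
  match path with
  | [] => PySem.Set.equal (PySem.Set.ofList graph.1) PySem.Set.empty
  | e0 :: _ =>
    let chain : List String := e0.1 :: path.map Prod.snd
    path.all (fun e => graph.2.contains e) &&
    (path.zip path.tail).all (fun p => p.1.2 == p.2.1) &&
    (PySem.Set.len (PySem.Set.ofList chain) == (chain.length : Int)) &&
    PySem.Set.equal (PySem.Set.ofList chain) (PySem.Set.ofList graph.1)

-- ===== PRECONDITION & SPEC =====
def Spec_check_is_eulerian_trail (graph : List String × (List (String × String))) (path : List (String × String)) (out : Bool) : Prop := out = check_is_eulerian_trail_alt graph path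
instance (graph : List String × (List (String × String))) (path : List (String × String)) (out : Bool) : Decidable (Spec_check_is_eulerian_trail graph path out) := by unfold Spec_check_is_eulerian_trail; infer_instance

-- ===== CLAIM (what is proved, stated in full; the proofs are below) =====
def Claim_equal_check_is_eulerian_trail : Prop := ∀ (graph : List String × (List (String × String))) (path : List (String × String)), Dom_check_is_eulerian_trail graph path → Spec_check_is_eulerian_trail graph path (check_is_eulerian_trail graph path)

-- ===== LEMMAS AND PROOFS =====

-- the continuity condition of B's zip pass, folded from the left
def contigFrom (v : String) : List (String × String) → Bool
  | [] => true
  | e :: rest => (v == e.1) && contigFrom e.2 rest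

lemma zip_all_eq_contigFrom (e : String × String) (rest : List (String × String)) :
    (((e :: rest).zip rest).all (fun p => p.1.2 == p.2.1)) = contigFrom e.2 rest := by
  induction rest generalizing e with
  | nil => rfl
  | cons f rest ih => rw [List.zip_cons_cons, List.all_cons, ih f, contigFrom]

lemma equal_comm (s t : PySem.Set String) : PySem.Set.equal s t = PySem.Set.equal t s := by
  simp [PySem.Set.equal, Bool.and_comm]

lemma len_ofList_eq_iff (xs : List String) :
    ((PySem.Set.ofList xs).length = xs.length) ↔ xs.Nodup := by
  induction xs with
  | nil => simp [PySem.Set.ofList, PySem.Set.empty]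
  | cons x xs ih =>
    rw [PySem.Set.ofList_cons]
    by_cases hx : x ∈ xs
    · have hlt : ((PySem.Set.ofList xs).discard x).length < xs.length := by
        have h1 : ((PySem.Set.ofList xs).discard x).length < (PySem.Set.ofList xs).length := by
          apply List.length_filter_lt_length_iff_exists.mpr
          exact ⟨x, (PySem.Set.mem_ofList xs x).mpr hx, by simp⟩
        exact lt_of_lt_of_le h1 (PySem.Set.length_ofList_le xs)
      simp only [List.length_cons, List.nodup_cons]
      constructor
      · intro h; omega
      · intro h; exact absurd hx h.1
    · have hd : (PySem.Set.ofList xs).discard x = PySem.Set.ofList xs := by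
        apply List.filter_eq_self.mpr
        intro a ha
        have hmem : a ∈ xs := (PySem.Set.mem_ofList xs a).mp ha
        have : a ≠ x := fun h => hx (h ▸ hmem)
        simp [this]
      simp [hd, ih, hx]

-- Python's 'len(set(xs)) == len(xs)' is exactly distinctness of xs
lemma len_ofList_beq_eq_decide_nodup (xs : List String) :
    (PySem.Set.len (PySem.Set.ofList xs) == (xs.length : Int)) = decide xs.Nodup := by
  by_cases h : (PySem.Set.ofList xs).length = xs.length
  · simp [PySem.Set.len, h, (len_ofList_eq_iff xs).mp h]
  · have : ¬ xs.Nodup := fun hn => h ((len_ofList_eq_iff xs).mpr hn)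
    simp [PySem.Set.len, h, this]

-- core invariant: once A's loop has consumed a prefix whose chain of vertices is cs
-- (nodup, current vertex v ∈ cs, every visited edge starts at a vertex of cs other than v),
-- the remaining loop equals B's four independent conditions on cs ++ rest.map Prod.snd.
lemma aLoop_eq (vertices : List String) (edges : List (String × String)) :
    ∀ (rest : List (String × String)) (v : String) (cs : List String)
      (visE : PySem.Set (String × String)),
      v ∈ cs → cs.Nodup → (∀ p ∈ visE, p.1 ∈ cs ∧ p.1 ≠ v) →
      aLoop vertices edges rest (some v) (PySem.Set.ofList cs) visE =
        (rest.all (fun e => edges.contains e) &&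
         contigFrom v rest &&
         decide ((cs ++ rest.map Prod.snd).Nodup) &&
         PySem.Set.equal (PySem.Set.ofList (cs ++ rest.map Prod.snd)) (PySem.Set.ofList vertices)) := by
  intro rest
  induction rest with
  | nil =>
    intro v cs visE hv hnd hinv
    simp [aLoop, contigFrom, hnd]
  | cons e rest ih =>
    intro v cs visE hv hnd hinv
    by_cases hmem : e ∈ edges
    · by_cases hvisE : e ∈ visE
      · -- e already visited: its first component differs from v, so continuity fails on both sides
        have he : e.1 ≠ v := (hinv e hvisE).2
        simp [aLoop, hmem, hvisE, contigFrom, Ne.symm he]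
      · by_cases hcont : v = e.1
        · by_cases hrep : e.2 ∈ cs
          · -- repeated vertex: A fails the visitedVertices check, B fails Nodup
            have hnn : ¬ (cs ++ e.2 :: List.map Prod.snd rest).Nodup := by
              intro h
              exact (List.disjoint_of_nodup_append h) hrep (by simp)
            simp [aLoop, hmem, hvisE, hcont, PySem.Set.mem_ofList, hrep, hnn]
          · -- step: extend the chain by e.2 and recurse
            have hnd' : (cs ++ [e.2]).Nodup := by
              rw [List.nodup_append]
              refine ⟨hnd, List.nodup_singleton _, ?_⟩
              intro a ha b hb
              rw [List.mem_singleton] at hb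
              subst hb
              exact fun h => hrep (h ▸ ha)
            have hstep := ih e.2 (cs ++ [e.2]) (PySem.Set.add visE e)
              (by simp) hnd'
              (by
                intro p hp
                rcases (PySem.Set.mem_add visE e p).mp hp with h | h
                · rcases hinv p h with ⟨h1, h2⟩
                  exact ⟨by simp [h1], fun hq => hrep (hq ▸ h1)⟩
                · subst h
                  refine ⟨by simp [← hcont, hv], ?_⟩
                  rw [← hcont]
                  exact fun hq => hrep (hq ▸ hv))
            have hadd : PySem.Set.add (PySem.Set.ofList cs) e.2 = PySem.Set.ofList (cs ++ [e.2]) :=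
              (PySem.Set.ofList_append_singleton cs e.2).symm
            have hL : aLoop vertices edges (e :: rest) (some v) (PySem.Set.ofList cs) visE =
                aLoop vertices edges rest (some e.2) (PySem.Set.ofList (cs ++ [e.2]))
                  (PySem.Set.add visE e) := by
              rw [← hadd]
              simp [aLoop, hmem, hvisE, hcont, hrep, PySem.Set.mem_ofList,
                PySem.Set.add, PySem.Set.contains]
            rw [hL, hstep]
            simp [contigFrom, hmem, hcont, Bool.and_assoc]
            all_goals rfl
        · -- broken continuity: both sides are False
          simp [aLoop, hmem, hvisE, contigFrom, hcont]
    · simp [aLoop, hmem]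

-- ===== VERDICT (by name: the statement is the Claim_ definition above) =====
theorem check_is_eulerian_trail_spec : Claim_equal_check_is_eulerian_trail := by
  intro graph path _
  unfold Spec_check_is_eulerian_trail
  obtain ⟨vertices, edges⟩ := graph
  match path with
  | [] =>
    simp only [check_is_eulerian_trail, check_is_eulerian_trail_alt, aLoop]
    exact equal_comm _ _
  | e0 :: rest =>
    simp only [check_is_eulerian_trail, check_is_eulerian_trail_alt]
    by_cases hmem : e0 ∈ edges
    · by_cases hself : e0.1 = e0.2
      · -- self-loop first edge: A fails the visitedVertices check, B fails Nodup
        have hnn : ¬ (e0.1 :: List.map Prod.snd (e0 :: rest)).Nodup := by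
          intro h
          rw [List.nodup_cons] at h
          exact h.1 (by simp [hself])
        have hd : decide ((e0.1 :: List.map Prod.snd (e0 :: rest)).Nodup) = false :=
          decide_eq_false hnn
        rw [len_ofList_beq_eq_decide_nodup, hd]
        simp [aLoop, hmem, PySem.Set.empty, PySem.Set.add, PySem.Set.contains, hself]
      · have hcs : PySem.Set.add (PySem.Set.add PySem.Set.empty e0.1) e0.2 =
            PySem.Set.ofList [e0.1, e0.2] := by
          simp [PySem.Set.ofList, PySem.Set.empty]
        have hstep := aLoop_eq vertices edges rest e0.2 [e0.1, e0.2]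
          (PySem.Set.add PySem.Set.empty e0) (by simp) (by simp [hself])
          (by
            intro p hp
            rcases (PySem.Set.mem_add _ e0 p).mp hp with h | h
            · simp [PySem.Set.empty] at h
            · subst h; exact ⟨by simp, fun hq => hself hq⟩)
        simp only [List.tail_cons]
        rw [zip_all_eq_contigFrom e0 rest, len_ofList_beq_eq_decide_nodup]
        have h1 : PySem.Set.ofList [e0.1, e0.2] = [e0.1, e0.2] :=
          PySem.Set.ofList_eq_self_of_nodup [e0.1, e0.2]
            (by rw [List.nodup_cons]; exact ⟨by simpa using hself, List.nodup_singleton _⟩)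
        rw [h1, show PySem.Set.add PySem.Set.empty e0 = [e0] from rfl] at hstep
        have hA : aLoop vertices edges (e0 :: rest) none PySem.Set.empty PySem.Set.empty =
            aLoop vertices edges rest (some e0.2) [e0.1, e0.2] [e0] := by
          simp [aLoop, hmem, PySem.Set.empty, PySem.Set.add, PySem.Set.contains, Ne.symm hself]
        rw [hA, hstep]
        simp [hmem, Bool.and_assoc]
        all_goals rfl
    · simp [aLoop, hmem]
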